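-- pv_equiv track=rewrite | github.com/mnemonic-no/provreq-vulnchain | provreq/vulnchain/build_agent_promises.py | mod_requires
-- ===== SOURCE A (Python) =====
-- def mod_requires(requires: set, applications: set) -> set[str]:
--     """Modify requires based on wether there are applications in the list"""
--
--     new_requires = set()
--     if not applications:
--         for require in requires:
--             if promise_should_not_be_specified(require):
--                 new_requires.add(require)
--             else:
--                 new_requires.add(f"{require}_os")
--         return new_requires
--     for app in applications:
--         for require in requires:
--             if promise_should_not_be_specified(require):
--                 new_requires.add(require)
--             else:
--                 new_requires.add(f"{require}_{app}")
--     return new_requires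
--
-- def promise_should_not_be_specified(promise: str) -> bool:
--     """check wether a promise should be specified with either
--     _os or _{application}"""
--
--     if any(x in promise for x in ["adjacent", "physical"]):
--         return True
--     return False
-- ===== SOURCE B (Python) =====
-- def mod_requires(requires: set, applications: set) -> set[str]:
--     """Classify each require once; later application passes only touch the
--     requires that actually take a per-application suffix."""
--     apps = list(applications)
--     first_suffix = apps[0] if apps else "os"
--     new_requires = set()
--     specified = []
--     for require in requires:
--         if "adjacent" in require or "physical" in require:
--             new_requires.add(require)
--         else:
--             specified.append(require)
--             new_requires.add(f"{require}_{first_suffix}")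
--     for app in apps[1:]:
--         for require in specified:
--             new_requires.add(f"{require}_{app}")
--     return new_requires
-- ===== Notes on version B (the rewrite author's own statement) =====
-- stated objective: alternative
-- what changed: B classifies each require once (the substring tests run once per require, not once per app*require) and the per-application passes after the first loop only over the requires that take a per-application suffix, instead of re-scanning and re-testing the whole requires set for every application.
import Mathlib
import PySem

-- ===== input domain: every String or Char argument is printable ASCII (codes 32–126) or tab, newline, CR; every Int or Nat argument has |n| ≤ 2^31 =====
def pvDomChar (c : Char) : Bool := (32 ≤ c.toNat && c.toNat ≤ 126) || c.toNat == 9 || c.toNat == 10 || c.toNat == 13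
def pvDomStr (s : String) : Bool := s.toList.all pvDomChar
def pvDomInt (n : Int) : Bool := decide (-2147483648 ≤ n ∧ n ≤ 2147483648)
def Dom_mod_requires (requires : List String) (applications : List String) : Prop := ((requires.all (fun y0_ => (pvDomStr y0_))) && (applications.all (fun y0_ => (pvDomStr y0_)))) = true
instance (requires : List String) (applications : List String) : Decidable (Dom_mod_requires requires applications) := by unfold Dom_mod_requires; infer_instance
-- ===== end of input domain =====

-- B restructures mod_requires: it classifies each require once and loops the later
-- application passes only over the requires that take a per-application suffix (alternative decomposition).

-- ===== PORT A =====
-- f"{x}_{y}" ported exactly as the char-list concatenation x ++ "_" ++ y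
def pyCat (r suf : String) : String := String.ofList (r.toList ++ '_' :: suf.toList)

def promise_should_not_be_specified (promise : String) : Bool :=
  ["adjacent", "physical"].any (fun x => PySem.Str.isIn x promise)

def mod_requires (requires : List String) (applications : List String) : List String :=
  if applications = [] then
    requires.foldl (fun new_requires require =>
      if promise_should_not_be_specified require then PySem.Set.add new_requires require
      else PySem.Set.add new_requires (pyCat require "os")) PySem.Set.empty
  else
    applications.foldl (fun new_requires app =>
      requires.foldl (fun new_requires require =>
        if promise_should_not_be_specified require then PySem.Set.add new_requires require
        else PySem.Set.add new_requires (pyCat require app)) new_requires) PySem.Set.empty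

-- ===== PORT B =====
-- B's inline test '"adjacent" in require or "physical" in require'
def bNot (r : String) : Bool := PySem.Str.isIn "adjacent" r || PySem.Str.isIn "physical" r

-- B: classify each require once; later application passes loop only over the specified requires.
def mod_requires_alt (requires : List String) (applications : List String) : List String :=
  let first_suffix : String := match applications with | [] => "os" | a :: _ => a
  let p : PySem.Set String × List String := requires.foldl
    (fun acc require =>
      if bNot require then
        (PySem.Set.add acc.1 require, acc.2)
      else
        (PySem.Set.add acc.1 (pyCat require first_suffix), acc.2 ++ [require]))
    (PySem.Set.empty, [])
  (applications.drop 1).foldl (fun new_requires app =>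
    p.2.foldl (fun new_requires require => PySem.Set.add new_requires (pyCat require app)) new_requires) p.1

-- ===== PRECONDITION & SPEC =====
def Spec_mod_requires (requires : List String) (applications : List String) (out : List String) : Prop := out = mod_requires_alt requires applications
instance (requires : List String) (applications : List String) (out : List String) : Decidable (Spec_mod_requires requires applications out) := by unfold Spec_mod_requires; infer_instance

-- ===== CLAIM (what is proved, stated in full; the proofs are below) =====
def Claim_equal_mod_requires : Prop := ∀ (requires : List String) (applications : List String), Dom_mod_requires requires applications → Spec_mod_requires requires applications (mod_requires requires applications)

-- ===== LEMMAS AND PROOFS =====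
theorem shouldNot_eq (r : String) : promise_should_not_be_specified r = bNot r := by
  simp [promise_should_not_be_specified, bNot, List.any]

-- one pass of A's inner loop, written with B's test
def stepA (app : String) (s : PySem.Set String) (r : String) : PySem.Set String :=
  if bNot r then PySem.Set.add s r else PySem.Set.add s (pyCat r app)

theorem innerA_eq_stepA (app : String) (l : List String) (s : PySem.Set String) :
    l.foldl (fun new_requires require =>
      if promise_should_not_be_specified require then PySem.Set.add new_requires require
      else PySem.Set.add new_requires (pyCat require app)) s = l.foldl (stepA app) s := by
  refine PySem.List.foldl_congr_mem l _ _ s (fun acc x _ => ?_)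
  simp [stepA, shouldNot_eq x]

-- membership is monotone along A's inner loop
theorem mem_foldl_stepA (app x : String) (l : List String) (s : PySem.Set String)
    (hx : x ∈ s) : x ∈ l.foldl (stepA app) s := by
  induction l generalizing s with
  | nil => exact hx
  | cons r t ih =>
    refine ih _ ?_
    simp only [stepA]
    split <;> exact (PySem.Set.mem_add _ _ _).mpr (Or.inl hx)

-- every plain require ends up in the set after one inner pass
theorem plain_mem_foldl (app : String) (l : List String) (s : PySem.Set String)
    (r : String) (hr : r ∈ l) (hp : bNot r = true) :
    r ∈ l.foldl (stepA app) s := by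
  induction l generalizing s with
  | nil => cases hr
  | cons q t ih =>
    rcases List.mem_cons.mp hr with h | h
    · subst h
      refine mem_foldl_stepA app r t _ ?_
      simp only [stepA, hp]
      exact (PySem.Set.mem_add _ _ _).mpr (Or.inr rfl)
    · exact ih _ h

-- B's classifying pass, described: fst is A's first inner pass, snd collects the specified requires
theorem classify_fold (fs : String) (l : List String) (e : PySem.Set String) (acc : List String) :
    l.foldl (fun acc require =>
      if bNot require then (PySem.Set.add acc.1 require, acc.2)
      else (PySem.Set.add acc.1 (pyCat require fs), acc.2 ++ [require])) (e, acc)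
    = (l.foldl (stepA fs) e, acc ++ l.filter (fun r => ! bNot r)) := by
  induction l generalizing e acc with
  | nil => simp
  | cons r t ih =>
    simp only [List.foldl_cons, List.filter_cons]
    cases h : bNot r with
    | true => simp [stepA, h, ih]
    | false => simp [stepA, h, ih]

-- when the plain requires are already in the set, A's inner pass only adds suffixed specified requires
theorem inner_eq (app : String) (l : List String) (s : PySem.Set String)
    (hinv : ∀ r ∈ l, bNot r = true → r ∈ s) :
    l.foldl (stepA app) s
      = (l.filter (fun r => ! bNot r)).foldl
          (fun s r => PySem.Set.add s (pyCat r app)) s := by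
  induction l generalizing s with
  | nil => rfl
  | cons r t ih =>
    simp only [List.foldl_cons, List.filter_cons, stepA]
    by_cases h : bNot r = true
    · rw [if_pos h, PySem.Set.add_of_mem (hinv r (by simp) h), h]
      simp only [Bool.not_true, if_neg (by simp : ¬ (false = true))]
      exact ih s (fun q hq hp => hinv q (by simp [hq]) hp)
    · have hb : bNot r = false := by simpa using h
      rw [if_neg h, hb]
      simp only [Bool.not_false]
      exact ih _ (fun q hq hp =>
        (PySem.Set.mem_add _ _ _).mpr (Or.inl (hinv q (by simp [hq]) hp)))

-- the remaining application passes agree, given the invariant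
theorem outer_eq (reqs : List String) (rest : List String) (s : PySem.Set String)
    (hinv : ∀ r ∈ reqs, bNot r = true → r ∈ s) :
    rest.foldl (fun s app => reqs.foldl (stepA app) s) s
      = rest.foldl (fun s app =>
          (reqs.filter (fun r => ! bNot r)).foldl
            (fun s r => PySem.Set.add s (pyCat r app)) s) s := by
  induction rest generalizing s with
  | nil => rfl
  | cons a t ih =>
    simp only [List.foldl_cons]
    rw [← inner_eq a reqs s hinv]
    exact ih _ (fun r hr hp => plain_mem_foldl a reqs s r hr hp)

-- ===== VERDICT (by name: the statement is the Claim_ definition above) =====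
theorem mod_requires_spec : Claim_equal_mod_requires := by
  intro requires applications _
  unfold Spec_mod_requires mod_requires mod_requires_alt
  cases applications with
  | nil =>
    simp only [classify_fold, List.nil_append, List.drop, List.foldl_nil, if_pos]
    exact innerA_eq_stepA "os" requires PySem.Set.empty
  | cons a rest =>
    simp only [if_neg (by simp : ¬ (a :: rest = [])), classify_fold, List.nil_append,
      List.drop_one, List.tail_cons, List.foldl_cons, innerA_eq_stepA]
    exact outer_eq requires rest _ (fun r hr hp => plain_mem_foldl a requires _ r hr hp)
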